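-- pv_equiv track=rewrite | github.com/amarqz/my-advCal-solutions | 2022/day6/2022-d6.py | findFirstMarker
-- ===== SOURCE A (Python) =====
-- def checkIfMarkerOrMessage(lastF):
--     if len(set(lastF)) == len(lastF): return True
--     else: return False
--
-- def findFirstMarker(signal):
--     lastFour = []
--     count = 0
--
--     for char in signal:
--         if len(lastFour) == 4:
--             if checkIfMarkerOrMessage(lastFour): return count
--             lastFour.pop(0)
--         lastFour.append(char)
--         count += 1
-- ===== SOURCE B (Python) =====
-- def findFirstMarker(s):
--     for i in range(4, len(s)):
--         if len(set(s[i-4:i])) == 4: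
--             return i
-- ===== Notes on version B (the rewrite author's own statement) =====
-- stated objective: simpler
-- what changed: Replaces the maintained FIFO window list, running counter and helper predicate with a direct positional scan: for each index i in range(4, len(signal)) it slices the window signal[i-4:i] and returns the first i whose window has 4 distinct characters.
-- outside the precondition, e.g. on findFirstMarker('abc'): A returns None, B returns None
import Mathlib
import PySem

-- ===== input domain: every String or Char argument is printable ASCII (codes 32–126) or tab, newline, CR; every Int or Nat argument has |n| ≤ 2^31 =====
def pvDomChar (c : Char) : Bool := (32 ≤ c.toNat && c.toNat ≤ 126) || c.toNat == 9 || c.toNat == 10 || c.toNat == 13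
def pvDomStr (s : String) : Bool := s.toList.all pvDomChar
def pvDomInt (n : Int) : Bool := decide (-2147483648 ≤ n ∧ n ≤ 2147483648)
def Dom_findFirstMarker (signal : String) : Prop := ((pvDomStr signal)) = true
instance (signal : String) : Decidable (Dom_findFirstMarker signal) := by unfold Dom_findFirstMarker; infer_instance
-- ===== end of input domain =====

-- B replaces A's maintained FIFO window list and running counter with a direct
-- positional slice scan over range(4, len(signal)); objective: simpler.


-- ===== PORT A =====
def checkIfMarkerOrMessage (lastF : List Char) : Bool :=
  if (PySem.Set.ofList lastF).length = lastF.length then true else false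

-- the for-loop of A: state (remaining chars, lastFour, count); none = fell off the loop (Python None)
def findFirstMarkerLoop : List Char → List Char → Int → Option Int
  | [], _, _ => none
  | c :: rest, lastFour, count =>
    if lastFour.length = 4 then
      if checkIfMarkerOrMessage lastFour then some count
      else findFirstMarkerLoop rest (lastFour.tail ++ [c]) (count + 1)
    else findFirstMarkerLoop rest (lastFour ++ [c]) (count + 1)

def findFirstMarker (signal : String) : Int :=
  (findFirstMarkerLoop signal.toList [] 0).getD 0   -- Pre_ guarantees the loop returns (A never returns None there)

-- ===== PORT B =====
-- B's for-loop over range(4, len(signal)): first i whose window signal[i-4:i] has 4 distinct chars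
def findFirstMarkerAltLoop (s : List Char) : List Int → Option Int
  | [] => none
  | i :: rest =>
    if (PySem.Set.ofList (PySem.List.slice s (some (i - 4)) (some i))).length = 4 then some i
    else findFirstMarkerAltLoop s rest

def findFirstMarker_alt (signal : String) : Int :=
  (findFirstMarkerAltLoop signal.toList
      (PySem.List.pyRange 4 (PySem.Str.len signal) 1)).getD 0

-- ===== PRECONDITION & SPEC =====
-- Pre_ excludes exactly the inputs on which Python A falls off its loop and returns None
-- (no index i in [4, len) whose preceding 4-char window is all distinct): None is not an Int.
def Pre_findFirstMarker (signal : String) : Prop :=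
  ∃ i < signal.toList.length, 4 ≤ i ∧
    (PySem.Set.ofList ((signal.toList.drop (i - 4)).take 4)).length = 4
instance (signal : String) : Decidable (Pre_findFirstMarker signal) := by
  unfold Pre_findFirstMarker; infer_instance

def pvWitness_findFirstMarker : String := "abcde"

def Spec_findFirstMarker (signal : String) (out : Int) : Prop := out = findFirstMarker_alt signal
instance (signal : String) (out : Int) : Decidable (Spec_findFirstMarker signal out) := by unfold Spec_findFirstMarker; infer_instance

-- ===== CLAIM (what is proved, stated in full; the proofs are below) =====
def Claim_equal_findFirstMarker : Prop := ∀ (signal : String), Dom_findFirstMarker signal → Pre_findFirstMarker signal → Spec_findFirstMarker signal (findFirstMarker signal)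

-- ===== LEMMAS AND PROOFS =====

lemma window_succ (s : List Char) (i : Nat) (h4 : 4 ≤ i) (hi : i < s.length) :
    ((s.drop (i - 4)).take 4).tail ++ [s[i]] = (s.drop (i + 1 - 4)).take 4 := by
  rw [← List.drop_one, List.drop_take, List.drop_drop]
  have h1 : i - 4 + 1 = i - 3 := by omega
  have h2 : i + 1 - 4 = i - 3 := by omega
  rw [h1, h2, show (4:Nat) - 1 = 3 from rfl]
  have hlen : 3 < (s.drop (i - 3)).length := by simp; omega
  conv_rhs => rw [show (4:Nat) = 3 + 1 from rfl, List.take_add_one,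
                  List.getElem?_eq_getElem hlen]
  simp [List.getElem_drop]
  congr 1
  omega

lemma loop_eq_alt (s : List Char) : ∀ n i : Nat, n = s.length - i → 4 ≤ i → i ≤ s.length →
    findFirstMarkerLoop (s.drop i) ((s.drop (i - 4)).take 4) (i : Int) =
      findFirstMarkerAltLoop s (PySem.List.pyRange (i : Int) (s.length : Int) 1) := by
  intro n
  induction n with
  | zero =>
    intro i hn h4 hle
    have he : i = s.length := by omega
    subst he
    rw [List.drop_length, PySem.List.pyRange_one_eq_nil (le_refl _)]
    rfl
  | succ n ih =>
    intro i hn h4 hle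
    have hi : i < s.length := by omega
    rw [List.drop_eq_getElem_cons hi,
        PySem.List.pyRange_one_cons (by exact_mod_cast hi)]
    have hWlen : ((s.drop (i - 4)).take 4).length = 4 := by simp; omega
    have hslice : PySem.List.slice s (some ((i:Nat) - 4 : Int)) (some (i:Int))
        = (s.drop (i - 4)).take 4 := by
      rw [show ((i:Nat) - 4 : Int) = (((i - 4 : Nat) : Int)) from by omega,
          PySem.List.slice_natCast]
      congr 1
      omega
    simp only [findFirstMarkerLoop, findFirstMarkerAltLoop, hslice, hWlen]
    unfold checkIfMarkerOrMessage
    rw [hWlen]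
    by_cases hc : (PySem.Set.ofList ((s.drop (i - 4)).take 4)).length = 4
    · simp [hc]
    · simp only [hc, if_false, Bool.false_eq_true]
      rw [window_succ s i h4 hi,
          show ((i:Int) + 1) = (((i + 1 : Nat) : Int)) from by push_cast; ring,
          ih (i + 1) (by omega) (by omega) (by omega)]
      simp
lemma build_eq (s : List Char) : ∀ m i : Nat, m = 4 - i → i ≤ 4 → i ≤ s.length →
    findFirstMarkerLoop (s.drop i) (s.take i) (i : Int) =
      findFirstMarkerAltLoop s (PySem.List.pyRange 4 (s.length : Int) 1) := by
  intro m
  induction m with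
  | zero =>
    intro i hm h4 hle
    have he : i = 4 := by omega
    subst he
    have h := loop_eq_alt s (s.length - 4) 4 rfl (le_refl _) hle
    simpa using h
  | succ m ih =>
    intro i hm h4 hle
    have hi4 : i < 4 := by omega
    by_cases hi : i < s.length
    · rw [List.drop_eq_getElem_cons hi]
      have hl : ¬ (s.take i).length = 4 := by simp; omega
      have htake : s.take i ++ [s[i]] = s.take (i + 1) := by
        rw [List.take_add_one, List.getElem?_eq_getElem hi]; rfl
      simp only [findFirstMarkerLoop, if_neg hl]
      rw [htake, show ((i:Int) + 1) = (((i + 1 : Nat) : Int)) from by push_cast; ring,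
          ih (i + 1) (by omega) (by omega) (by omega)]
    · have he : i = s.length := by omega
      subst he
      rw [List.drop_length, PySem.List.pyRange_one_eq_nil (by exact_mod_cast h4)]
      rfl

-- ===== VERDICT (by name: the statement is the Claim_ definition above) =====
theorem findFirstMarker_spec : Claim_equal_findFirstMarker := by
  intro signal _ _
  unfold Spec_findFirstMarker findFirstMarker findFirstMarker_alt
  rw [show signal.toList = signal.toList.drop 0 from rfl,
      show ([] : List Char) = signal.toList.take 0 from rfl,
      show (0 : Int) = ((0 : Nat) : Int) from rfl,
      build_eq signal.toList 4 0 rfl (by omega) (by omega)]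
  simp [PySem.Str.len_eq]
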